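-- pv_equiv track=rewrite | github.com/austral-prog/tp-7-MRecioO | loops_and_print.py | enumerate_backwards
-- ===== SOURCE A (Python) =====
-- def enumerate_backwards(list):
--     nlist = []
--     if list != []:
--         i = 0
--         for elem in list:
--             if elem != '':
--                 nlist.append(f'{i}. {elem[::-1]}')
--                 i += 1
--         return nlist
--     else:
--         return list
-- ===== SOURCE B (Python) =====
-- def enumerate_backwards(list):
--     # Count the non-empty strings first, then build the output back-to-front:
--     # walk the input reversed with a descending counter, append, and reverse at the end.
--     remaining = sum(1 for s in list if s != '')
--     out = []
--     for s in reversed(list):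
--         if s != '':
--             remaining -= 1
--             out.append(f'{remaining}. {s[::-1]}')
--     out.reverse()
--     return out
-- ===== Notes on version B (the rewrite author's own statement) =====
-- stated objective: alternative
-- what changed: Instead of A's single forward loop with an ascending counter incremented on non-empty elements, B first counts the non-empty strings, then builds the output back-to-front by walking the reversed input with a descending counter and reversing the accumulator at the end.
import Mathlib
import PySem

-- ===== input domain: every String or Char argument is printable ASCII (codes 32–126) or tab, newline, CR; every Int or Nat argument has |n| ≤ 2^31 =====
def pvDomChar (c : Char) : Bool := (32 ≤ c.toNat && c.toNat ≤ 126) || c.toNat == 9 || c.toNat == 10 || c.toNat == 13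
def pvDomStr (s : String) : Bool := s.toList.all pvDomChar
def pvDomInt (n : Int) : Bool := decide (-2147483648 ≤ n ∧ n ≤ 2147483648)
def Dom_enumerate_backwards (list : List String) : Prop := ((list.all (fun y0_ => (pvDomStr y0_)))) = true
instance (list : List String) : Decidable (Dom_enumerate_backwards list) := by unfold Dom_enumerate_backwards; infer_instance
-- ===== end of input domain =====

-- B counts the non-empty strings first, then builds the output back-to-front over the
-- reversed input with a descending counter; objective: alternative decomposition.

-- the f-string f'{i}. {elem[::-1]}' (slice? with step -1 always returns some; exact per PySem)
def pvFmt (i : Int) (s : String) : String :=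
  PySem.Int.toStr i ++ ". " ++ ((PySem.Str.slice? s none none (-1)).getD "")

-- ===== PORT A =====
def enumerate_backwards (list : List String) : List String :=
  if list ≠ [] then
    (list.foldl
      (fun (st : List String × Int) elem =>
        if elem ≠ "" then (st.1 ++ [pvFmt st.2 elem], st.2 + 1) else st)
      ([], 0)).1
  else list

-- ===== PORT B =====
-- Source B: remaining = sum(1 for s in list if s != ''); walk reversed(list) with a
-- descending counter, appending; reverse the accumulator at the end.
def enumerate_backwards_alt (list : List String) : List String :=
  let remaining : Int := list.foldl (fun a s => if s ≠ "" then a + 1 else a) 0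
  let st := list.reverse.foldl
      (fun (st : Int × List String) s =>
        if s ≠ "" then (st.1 - 1, st.2 ++ [pvFmt (st.1 - 1) s]) else st)
      (remaining, [])
  st.2.reverse

-- ===== PRECONDITION & SPEC =====
def Spec_enumerate_backwards (list : List String) (out : List String) : Prop := out = enumerate_backwards_alt list
instance (list : List String) (out : List String) : Decidable (Spec_enumerate_backwards list out) := by unfold Spec_enumerate_backwards; infer_instance

-- ===== CLAIM (what is proved, stated in full; the proofs are below) =====
def Claim_equal_enumerate_backwards : Prop := ∀ (list : List String), Dom_enumerate_backwards list → Spec_enumerate_backwards list (enumerate_backwards list)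


-- ===== LEMMAS AND PROOFS =====
theorem enumA_loop (l : List String) (acc : List String) (i : Int) :
    (l.foldl
      (fun (st : List String × Int) elem =>
        if elem ≠ "" then (st.1 ++ [pvFmt st.2 elem], st.2 + 1) else st)
      (acc, i)).1
    = acc ++ (PySem.List.enumerate (l.filter (fun s => s ≠ "")) i).map (fun p => pvFmt p.1 p.2) := by
  induction l generalizing acc i with
  | nil => simp [PySem.List.enumerate_nil]
  | cons x xs ih =>
    by_cases hx : x = ""
    · have h := ih acc i
      simp [hx] at h ⊢
      exact h
    · have h := ih (acc ++ [pvFmt i x]) (i + 1)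
      simp [hx, PySem.List.enumerate_cons] at h ⊢
      simp [h]

theorem enumB_count (l : List String) (a : Int) :
    l.foldl (fun a s => if s ≠ "" then a + 1 else a) a
      = a + ((l.filter (fun s => s ≠ "")).length : Int) := by
  induction l generalizing a with
  | nil => simp
  | cons x xs ih =>
    rw [List.foldl_cons]
    by_cases hx : x = ""
    · rw [if_neg (by simp [hx]), ih]
      simp [hx]
    · rw [if_pos hx, ih]
      simp only [List.filter_cons]
      rw [if_pos (by simp [hx])]
      push_cast [List.length_cons]
      ring

theorem enumB_loop (l : List String) (acc : List String) (i : Int) :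
    l.reverse.foldl
      (fun (st : Int × List String) s =>
        if s ≠ "" then (st.1 - 1, st.2 ++ [pvFmt (st.1 - 1) s]) else st)
      (i, acc)
    = (i - ((l.filter (fun s => s ≠ "")).length : Int),
       acc ++ ((PySem.List.enumerate (l.filter (fun s => s ≠ ""))
                (i - ((l.filter (fun s => s ≠ "")).length : Int))).map
               (fun p => pvFmt p.1 p.2)).reverse) := by
  induction l generalizing acc i with
  | nil => simp [PySem.List.enumerate_nil]
  | cons x xs ih =>
    rw [List.reverse_cons, List.foldl_append, ih, List.foldl_cons, List.foldl_nil]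
    by_cases hx : x = ""
    · rw [if_neg (by simp [hx])]
      simp [hx]
    · rw [if_pos hx]
      simp only [List.filter_cons]
      rw [if_pos (by simp [hx])]
      have hlen : i - (((x :: (xs.filter (fun s => s ≠ ""))).length : Nat) : Int)
          = i - ((xs.filter (fun s => s ≠ "")).length : Int) - 1 := by
        push_cast [List.length_cons]; ring
      simp only [PySem.List.enumerate_cons, List.map_cons, List.reverse_cons, hlen]
      rw [show i - ((xs.filter (fun s => s ≠ "")).length : Int) - 1 + 1
            = i - ((xs.filter (fun s => s ≠ "")).length : Int) from by ring,
          List.append_assoc]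

-- ===== VERDICT (by name: the statement is the Claim_ definition above) =====
theorem enumerate_backwards_spec : Claim_equal_enumerate_backwards := by
  intro list _
  unfold Spec_enumerate_backwards enumerate_backwards enumerate_backwards_alt
  have hB := enumB_loop list [] (list.foldl (fun a s => if s ≠ "" then a + 1 else a) 0)
  rw [enumB_count list 0] at hB
  simp only [hB, enumB_count, List.nil_append, List.reverse_reverse]
  cases list with
  | nil => simp [PySem.List.enumerate_nil]
  | cons x xs =>
    simpa using enumA_loop (x :: xs) [] 0
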